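-- pv_equiv track=rewrite | github.com/R00T-Kim/SCOUT | src/aiedge/graph.py | _evidence_signal_profile
-- ===== SOURCE A (Python) =====
-- def _is_run_relative_path(path: object) -> bool:
--     return isinstance(path, str) and bool(path) and not path.startswith("/")
--
-- def _sorted_unique_refs(refs: list[str]) -> list[str]:
--     return sorted({r.replace("\\", "/") for r in refs if _is_run_relative_path(r)})
--
-- def _evidence_signal_profile(
--     refs: tuple[str, ...] | list[str],
-- ) -> tuple[list[str], str, dict[str, int], bool]:
--     normalized_refs = [
--         x
--         for x in _sorted_unique_refs([str(v) for v in refs if isinstance(v, str)])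
--         if x
--     ]
--     dynamic_count = sum(
--         1 for ref in normalized_refs if ref.startswith("stages/dynamic_validation/")
--     )
--     exploit_count = sum(1 for ref in normalized_refs if ref.startswith("exploits/"))
--     verified_count = sum(
--         1 for ref in normalized_refs if ref.startswith("verified_chain/")
--     )
--     static_count = max(
--         0, len(normalized_refs) - dynamic_count - exploit_count - verified_count
--     )
--
--     signals: list[str] = []
--     if dynamic_count > 0:
--         signals.append("dynamic_validation")
--     if exploit_count > 0:
--         signals.append("exploit")
--     if verified_count > 0:
--         signals.append("verified_chain")
--     if static_count > 0:
--         signals.append("static")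
--
--     if dynamic_count > 0 and exploit_count > 0 and verified_count > 0:
--         badge = "D+E+V"
--     elif dynamic_count > 0 and exploit_count > 0:
--         badge = "D+E"
--     elif dynamic_count > 0 and verified_count > 0:
--         badge = "D+V"
--     elif exploit_count > 0 and verified_count > 0:
--         badge = "E+V"
--     elif dynamic_count > 0:
--         badge = "D"
--     elif exploit_count > 0:
--         badge = "E"
--     elif verified_count > 0:
--         badge = "V"
--     else:
--         badge = "S"
--
--     return (
--         signals,
--         badge,
--         {
--             "dynamic": dynamic_count,
--             "exploit": exploit_count,
--             "verified_chain": verified_count,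
--             "static": static_count,
--         },
--         dynamic_count > 0 and exploit_count > 0,
--     )
-- ===== SOURCE B (Python) =====
-- def _evidence_signal_profile(refs):
--     seen = set()
--     for v in refs:
--         if isinstance(v, str) and v and not v.startswith("/"):
--             seen.add(v.replace("\\", "/"))
--     normalized = sorted(seen)
--
--     d = e = vc = s = 0
--     for ref in normalized:
--         if ref.startswith("stages/dynamic_validation/"):
--             d += 1
--         elif ref.startswith("exploits/"):
--             e += 1
--         elif ref.startswith("verified_chain/"):
--             vc += 1
--         else:
--             s += 1
--
--     table = [("dynamic_validation", "D", d), ("exploit", "E", e),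
--              ("verified_chain", "V", vc), ("static", "", s)]
--     signals = [name for name, _, c in table if c > 0]
--     badge = "+".join(letter for _, letter, c in table if letter and c > 0) or "S"
--     return (signals, badge,
--             {"dynamic": d, "exploit": e, "verified_chain": vc, "static": s},
--             d > 0 and e > 0)
-- ===== Notes on version B (the rewrite author's own statement) =====
-- stated objective: simpler
-- what changed: B classifies each normalized ref once in a single pass (4-way elif into four counters) instead of A's four separate counting comprehensions, and derives both the signals list and the badge from one category table (the badge by joining the present letters with '+', falling back to 'S') instead of A's eight-way if/elif cascade.
import Mathlib
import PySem

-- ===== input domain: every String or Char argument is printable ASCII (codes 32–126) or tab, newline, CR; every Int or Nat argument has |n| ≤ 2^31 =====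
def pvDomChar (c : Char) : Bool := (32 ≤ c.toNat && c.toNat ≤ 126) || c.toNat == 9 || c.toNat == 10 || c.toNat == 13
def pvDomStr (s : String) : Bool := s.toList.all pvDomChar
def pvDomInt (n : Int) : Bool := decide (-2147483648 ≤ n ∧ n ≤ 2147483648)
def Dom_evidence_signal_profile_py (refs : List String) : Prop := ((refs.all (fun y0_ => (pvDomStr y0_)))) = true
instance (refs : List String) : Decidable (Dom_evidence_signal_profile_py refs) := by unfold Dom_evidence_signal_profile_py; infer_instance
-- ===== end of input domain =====

-- B replaces A's four counting passes over the normalized refs by one classifying pass,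
-- and the eight-way badge cascade by a join over the present category letters (objective: simpler).

-- ===== PORT A =====
def pvIsRunRelative (p : String) : Bool :=
  decide (p ≠ "") && !(PySem.Str.startswith p "/")

def pvSortedUniqueRefs (refs : List String) : List String :=
  PySem.List.sorted
    (PySem.Set.ofList ((refs.filter pvIsRunRelative).map (fun r => PySem.Str.replace r "\\" "/")))
    (fun x => x) false

def evidence_signal_profile_py (refs : List String) : List String × String × (List (String × Int)) × Bool :=
  let normalized := (pvSortedUniqueRefs refs).filter (fun x => decide (x ≠ ""))
  let dyn : Int := (normalized.countP (fun r => PySem.Str.startswith r "stages/dynamic_validation/") : Int)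
  let exp : Int := (normalized.countP (fun r => PySem.Str.startswith r "exploits/") : Int)
  let ver : Int := (normalized.countP (fun r => PySem.Str.startswith r "verified_chain/") : Int)
  let sta : Int := max 0 ((normalized.length : Int) - dyn - exp - ver)
  let signals : List String := []
  let signals := if 0 < dyn then signals ++ ["dynamic_validation"] else signals
  let signals := if 0 < exp then signals ++ ["exploit"] else signals
  let signals := if 0 < ver then signals ++ ["verified_chain"] else signals
  let signals := if 0 < sta then signals ++ ["static"] else signals
  let badge : String :=
    if 0 < dyn ∧ 0 < exp ∧ 0 < ver then "D+E+V"
    else if 0 < dyn ∧ 0 < exp then "D+E"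
    else if 0 < dyn ∧ 0 < ver then "D+V"
    else if 0 < exp ∧ 0 < ver then "E+V"
    else if 0 < dyn then "D"
    else if 0 < exp then "E"
    else if 0 < ver then "V"
    else "S"
  (signals, badge,
    [("dynamic", dyn), ("exploit", exp), ("verified_chain", ver), ("static", sta)],
    decide (0 < dyn) && decide (0 < exp))

-- ===== PORT B =====
def evidence_signal_profile_py_alt (refs : List String) : List String × String × (List (String × Int)) × Bool :=
  let seen : PySem.Set String := refs.foldl (fun s v =>
      if v ≠ "" ∧ ¬ (PySem.Str.startswith v "/" = true)
      then PySem.Set.add s (PySem.Str.replace v "\\" "/") else s) PySem.Set.empty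
  let normalized := PySem.List.sorted seen (fun x => x) false
  let c : Int × Int × Int × Int := normalized.foldl (fun c ref =>
      if PySem.Str.startswith ref "stages/dynamic_validation/"
      then (c.1 + 1, c.2.1, c.2.2.1, c.2.2.2)
      else if PySem.Str.startswith ref "exploits/"
      then (c.1, c.2.1 + 1, c.2.2.1, c.2.2.2)
      else if PySem.Str.startswith ref "verified_chain/"
      then (c.1, c.2.1, c.2.2.1 + 1, c.2.2.2)
      else (c.1, c.2.1, c.2.2.1, c.2.2.2 + 1)) (0, 0, 0, 0)
  let table : List (String × String × Int) :=
    [("dynamic_validation", "D", c.1), ("exploit", "E", c.2.1),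
     ("verified_chain", "V", c.2.2.1), ("static", "", c.2.2.2)]
  let signals := (table.filter (fun t => 0 < t.2.2)).map (fun t => t.1)
  let j := PySem.Str.join "+" ((table.filter (fun t => t.2.1 ≠ "" ∧ 0 < t.2.2)).map (fun t => t.2.1))
  let badge := if j = "" then "S" else j
  (signals, badge,
    [("dynamic", c.1), ("exploit", c.2.1), ("verified_chain", c.2.2.1), ("static", c.2.2.2)],
    decide (0 < c.1) && decide (0 < c.2.1))

-- ===== PRECONDITION & SPEC =====
def Spec_evidence_signal_profile_py (refs : List String) (out : List String × String × (List (String × Int)) × Bool) : Prop := out = evidence_signal_profile_py_alt refs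
instance (refs : List String) (out : List String × String × (List (String × Int)) × Bool) : Decidable (Spec_evidence_signal_profile_py refs out) := by unfold Spec_evidence_signal_profile_py; infer_instance

-- ===== CLAIM (what is proved, stated in full; the proofs are below) =====
def Claim_equal_evidence_signal_profile_py : Prop := ∀ (refs : List String), Dom_evidence_signal_profile_py refs → Spec_evidence_signal_profile_py refs (evidence_signal_profile_py refs)

-- ===== LEMMAS AND PROOFS =====

-- B's conditional set-building fold is A's set-of-a-mapped-filter.
theorem pv_foldl_add_filter_map {α β : Type} [BEq β] (p : α → Bool) (f : α → β) :
    ∀ (l : List α) (s : PySem.Set β),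
      l.foldl (fun s v => if p v then PySem.Set.add s (f v) else s) s
        = ((l.filter p).map f).foldl PySem.Set.add s := by
  intro l
  induction l with
  | nil => intro s; rfl
  | cons h t ih => intro s; by_cases hp : p h <;> simp [hp, ih]

theorem pv_replace_go_ne_nil :
    ∀ (fuel : Nat) (l acc : List Char), (l ≠ [] ∨ acc ≠ []) →
      PySem.Chars.replace.go (['\\']) (['/']) fuel l acc ≠ [] := by
  intro fuel
  induction fuel with
  | zero => intro l acc h; rw [PySem.Chars.replace.go.eq_def]; simp; rcases h with h | h <;> simp [h]
  | succ n ih =>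
    intro l acc h
    rw [PySem.Chars.replace.go.eq_def]
    cases l with
    | nil =>
      simp only []
      rcases h with h | h
      · exact absurd rfl h
      · simpa using h
    | cons c t =>
      simp only []
      split
      · exact ih _ _ (Or.inr (by simp))
      · exact ih _ _ (Or.inr (by simp))

-- replacing "\" by "/" never empties a nonempty string
theorem pv_replace_ne_empty (r : String) (h : r ≠ "") :
    PySem.Str.replace r "\\" "/" ≠ "" := by
  intro he
  have h2 : (PySem.Str.replace r "\\" "/").toList = [] := by rw [he]; rfl
  rw [PySem.Str.toList_replace] at h2
  have hr : r.toList ≠ [] := fun hn => h (String.toList_eq_nil_iff.mp hn)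
  unfold PySem.Chars.replace at h2
  simp at h2
  exact pv_replace_go_ne_nil _ _ _ (Or.inl hr) h2

-- B's single counting pass computes the four partition counts
theorem pv_counts_fold (p1 p2 p3 : String → Bool) :
    ∀ (l : List String) (a b c d : Int),
      l.foldl (fun c ref =>
        if p1 ref then ((c : Int × Int × Int × Int).1 + 1, c.2.1, c.2.2.1, c.2.2.2)
        else if p2 ref then (c.1, c.2.1 + 1, c.2.2.1, c.2.2.2)
        else if p3 ref then (c.1, c.2.1, c.2.2.1 + 1, c.2.2.2)
        else (c.1, c.2.1, c.2.2.1, c.2.2.2 + 1)) (a, b, c, d)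
      = (a + (l.countP p1 : Int),
         b + (l.countP (fun x => !p1 x && p2 x) : Int),
         c + (l.countP (fun x => !p1 x && !p2 x && p3 x) : Int),
         d + (l.countP (fun x => !p1 x && !p2 x && !p3 x) : Int)) := by
  intro l
  induction l with
  | nil => intro a b c d; simp
  | cons h t ih =>
    intro a b c d
    by_cases h1 : p1 h <;> by_cases h2 : p2 h <;> by_cases h3 : p3 h <;>
      simp [h1, h2, h3, ih] <;> ring_nf

-- the four classes partition the list
theorem pv_counts_sum (p1 p2 p3 : String → Bool) (l : List String) :
    l.countP p1 + l.countP (fun x => !p1 x && p2 x)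
      + l.countP (fun x => !p1 x && !p2 x && p3 x)
      + l.countP (fun x => !p1 x && !p2 x && !p3 x) = l.length := by
  induction l with
  | nil => simp
  | cons h t ih =>
    by_cases h1 : p1 h <;> by_cases h2 : p2 h <;> by_cases h3 : p3 h <;>
      simp [h1, h2, h3] <;> omega

-- two incomparable prefixes cannot both start the same string
theorem pv_startswith_excl (a b x : String) (hna : ¬ (a.toList <+: b.toList)) (hnb : ¬ (b.toList <+: a.toList))
    (ha : PySem.Str.startswith x a = true) : PySem.Str.startswith x b = false := by
  by_contra hb
  rw [Bool.not_eq_false] at hb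
  rw [PySem.Str.startswith_eq, PySem.Chars.startswith_iff] at ha hb
  rcases List.prefix_or_prefix_of_prefix ha hb with h | h
  · exact hna h
  · exact hnb h

-- literal join values used by B's badge
theorem pv_join_dev : PySem.Str.join "+" ["D", "E", "V"] = "D+E+V" := by decide
theorem pv_join_de : PySem.Str.join "+" ["D", "E"] = "D+E" := by decide
theorem pv_join_dv : PySem.Str.join "+" ["D", "V"] = "D+V" := by decide
theorem pv_join_ev : PySem.Str.join "+" ["E", "V"] = "E+V" := by decide
theorem pv_join_d : PySem.Str.join "+" ["D"] = "D" := by decide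
theorem pv_join_e : PySem.Str.join "+" ["E"] = "E" := by decide
theorem pv_join_v : PySem.Str.join "+" ["V"] = "V" := by decide
theorem pv_join_nil : PySem.Str.join "+" ([] : List String) = "" := by decide

-- rendering from the same four counts agrees
theorem pv_render (d e v s : Int) :
    ((if 0 < s then ((if 0 < v then ((if 0 < e then ((if 0 < d then ([] : List String) ++ ["dynamic_validation"] else []) ++ ["exploit"]) else (if 0 < d then ([] : List String) ++ ["dynamic_validation"] else [])) ++ ["verified_chain"]) else (if 0 < e then ((if 0 < d then ([] : List String) ++ ["dynamic_validation"] else []) ++ ["exploit"]) else (if 0 < d then ([] : List String) ++ ["dynamic_validation"] else []))) ++ ["static"]) else (if 0 < v then ((if 0 < e then ((if 0 < d then ([] : List String) ++ ["dynamic_validation"] else []) ++ ["exploit"]) else (if 0 < d then ([] : List String) ++ ["dynamic_validation"] else [])) ++ ["verified_chain"]) else (if 0 < e then ((if 0 < d then ([] : List String) ++ ["dynamic_validation"] else []) ++ ["exploit"]) else (if 0 < d then ([] : List String) ++ ["dynamic_validation"] else [])))),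
      (if 0 < d ∧ 0 < e ∧ 0 < v then "D+E+V"
       else if 0 < d ∧ 0 < e then "D+E"
       else if 0 < d ∧ 0 < v then "D+V"
       else if 0 < e ∧ 0 < v then "E+V"
       else if 0 < d then "D"
       else if 0 < e then "E"
       else if 0 < v then "V"
       else "S"),
      ([("dynamic", d), ("exploit", e), ("verified_chain", v), ("static", s)] : List (String × Int)),
      decide (0 < d) && decide (0 < e))
    = ((([("dynamic_validation", "D", d), ("exploit", "E", e), ("verified_chain", "V", v), ("static", "", s)] : List (String × String × Int)).filter (fun t => 0 < t.2.2)).map (fun t => t.1),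
       (if PySem.Str.join "+" ((([("dynamic_validation", "D", d), ("exploit", "E", e), ("verified_chain", "V", v), ("static", "", s)] : List (String × String × Int)).filter (fun t => t.2.1 ≠ "" ∧ 0 < t.2.2)).map (fun t => t.2.1)) = "" then "S"
        else PySem.Str.join "+" ((([("dynamic_validation", "D", d), ("exploit", "E", e), ("verified_chain", "V", v), ("static", "", s)] : List (String × String × Int)).filter (fun t => t.2.1 ≠ "" ∧ 0 < t.2.2)).map (fun t => t.2.1))),
       ([("dynamic", d), ("exploit", e), ("verified_chain", v), ("static", s)] : List (String × Int)),
       decide (0 < d) && decide (0 < e)) := by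
  by_cases hd : 0 < d <;> by_cases he : 0 < e <;> by_cases hv : 0 < v <;> by_cases hs : 0 < s <;>
    simp [hd, he, hv, hs, pv_join_dev, pv_join_de, pv_join_dv, pv_join_ev, pv_join_d, pv_join_e, pv_join_v, pv_join_nil]

-- ===== VERDICT (by name: the statement is the Claim_ definition above) =====
theorem evidence_signal_profile_py_spec : Claim_equal_evidence_signal_profile_py := by
  intro refs _
  unfold Spec_evidence_signal_profile_py
  unfold evidence_signal_profile_py evidence_signal_profile_py_alt pvSortedUniqueRefs
  have hstep : (fun (s : PySem.Set String) v =>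
      if v ≠ "" ∧ ¬ (PySem.Str.startswith v "/" = true)
      then PySem.Set.add s (PySem.Str.replace v "\\" "/") else s)
      = (fun (s : PySem.Set String) v => if pvIsRunRelative v then PySem.Set.add s (PySem.Str.replace v "\\" "/") else s) := by
    funext s v
    by_cases h1 : v = "" <;> by_cases h2 : PySem.Str.startswith v "/" <;>
      simp [pvIsRunRelative, h1]
  rw [hstep, pv_foldl_add_filter_map]
  dsimp only []
  rw [show (PySem.Set.empty : PySem.Set String) = [] from rfl, ← PySem.Set.ofList_eq_foldl]
  set n := PySem.List.sorted
      (PySem.Set.ofList ((refs.filter pvIsRunRelative).map (fun r => PySem.Str.replace r "\\" "/")))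
      (fun x => x) false with hn
  have hfilter : n.filter (fun x => decide (x ≠ "")) = n := by
    apply List.filter_eq_self.mpr
    intro a ha
    have ham : a ∈ (refs.filter pvIsRunRelative).map (fun r => PySem.Str.replace r "\\" "/") := by
      have := (PySem.List.mem_sorted (xs := PySem.Set.ofList ((refs.filter pvIsRunRelative).map (fun r => PySem.Str.replace r "\\" "/"))) (key := fun x => x) (rev := false) (x := a)).mp (hn ▸ ha)
      exact (PySem.Set.mem_ofList _ _).mp this
    obtain ⟨r, hr, hra⟩ := List.mem_map.mp ham
    have hrne : r ≠ "" := by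
      have := List.of_mem_filter hr
      simp [pvIsRunRelative] at this
      exact this.1
    simpa using hra ▸ pv_replace_ne_empty r hrne
  rw [hfilter, pv_counts_fold]
  have he2 : n.countP (fun x => !PySem.Str.startswith x "stages/dynamic_validation/" && PySem.Str.startswith x "exploits/")
      = n.countP (fun x => PySem.Str.startswith x "exploits/") := by
    apply List.countP_congr
    intro x _
    by_cases h : PySem.Str.startswith x "exploits/" = true
    · have h1 := pv_startswith_excl "exploits/" "stages/dynamic_validation/" x (by decide) (by decide) h
      simp only [h, h1, Bool.not_false, Bool.true_and]
    · simp only [eq_false_of_ne_true h, Bool.and_false]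
  have hv2 : n.countP (fun x => !PySem.Str.startswith x "stages/dynamic_validation/" && !PySem.Str.startswith x "exploits/" && PySem.Str.startswith x "verified_chain/")
      = n.countP (fun x => PySem.Str.startswith x "verified_chain/") := by
    apply List.countP_congr
    intro x _
    by_cases h : PySem.Str.startswith x "verified_chain/" = true
    · have h1 := pv_startswith_excl "verified_chain/" "stages/dynamic_validation/" x (by decide) (by decide) h
      have h2 := pv_startswith_excl "verified_chain/" "exploits/" x (by decide) (by decide) h
      simp only [h, h1, h2, Bool.not_false, Bool.and_true]
    · simp only [eq_false_of_ne_true h, Bool.and_false]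
  have hsum := pv_counts_sum (fun x => PySem.Str.startswith x "stages/dynamic_validation/")
    (fun x => PySem.Str.startswith x "exploits/") (fun x => PySem.Str.startswith x "verified_chain/") n
  rw [he2, hv2] at hsum ⊢
  have hsta : max 0 ((n.length : Int)
      - (n.countP (fun r => PySem.Str.startswith r "stages/dynamic_validation/") : Int)
      - (n.countP (fun r => PySem.Str.startswith r "exploits/") : Int)
      - (n.countP (fun r => PySem.Str.startswith r "verified_chain/") : Int))
      = ((n.countP (fun x => !PySem.Str.startswith x "stages/dynamic_validation/" && !PySem.Str.startswith x "exploits/" && !PySem.Str.startswith x "verified_chain/") : Int)) := by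
    omega
  simp only [zero_add, hsta]
  exact pv_render _ _ _ _
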